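-- pv_equiv track=rewrite | github.com/jramaswami/Binary_Search_Python | remove_interval_overlaps.py | solve
-- ===== SOURCE A (Python) =====
-- def solve(intervals):
--     # Corner case: empty intervals
--     if intervals == []:
--         return 0
--
--     def overlaps(L1, R1, L2, R2):
--         """Return True if intervals overlap."""
--         return max(L1, L2) < min(R1, R2)
--
--     intervals.sort()
--     dp = [1 for _ in intervals]
--     for i, (L1, R1) in enumerate(intervals):
--         for j, (L2, R2) in enumerate(intervals[:i]):
--             if not overlaps(L1, R1, L2, R2):
--                 dp[i] = max(dp[i], dp[j] + 1)
--
--     return len(intervals) - max(dp)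
-- ===== SOURCE B (Python) =====
-- def solve(intervals):
--     """Minimum number of intervals to remove so that no two remaining intervals
--     overlap, where (L1,R1) and (L2,R2) overlap iff max(L1,L2) < min(R1,R2).
--
--     Answer = n minus the longest chain of sorted intervals in which each
--     interval is disjoint from its predecessor.  After sorting by start, a new
--     interval (L,R) is disjoint from an earlier (L2,R2) iff min(R,R2) <= L:
--     every earlier interval qualifies when R <= L (the interval is empty, it
--     touches nothing), and exactly those with R2 <= L otherwise.  A single
--     sweep keeps (end, chain length) for the still-open intervals; an interval
--     whose end drops to <= the current start is folded into `closed` once and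
--     never rescanned.
--     """
--     if not intervals:
--         return 0
--     n = len(intervals)
--     closed = 0      # longest chain among intervals that have ended by the current start
--     longest = 0     # longest chain among all intervals processed so far
--     open_ends = []  # (end, chain length) of processed intervals still open
--     for L, R in sorted(intervals):
--         still_open = []
--         for end, length in open_ends:
--             if end <= L:
--                 closed = max(closed, length)
--             else:
--                 still_open.append((end, length))
--         open_ends = still_open
--         if R <= L:          # empty interval: disjoint from every predecessor
--             length = longest + 1
--         else:               # disjoint exactly from the chains already closed
--             length = closed + 1
--         longest = max(longest, length)
--         open_ends.append((R, length))
--     return n - longest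
-- ===== Notes on version B (the rewrite author's own statement) =====
-- stated objective: faster
-- what changed: Replaces the all-pairs DP (for each interval a rescan of every earlier interval plus a slice copy and a final max pass) with a single left-to-right sweep over the sorted intervals that folds each already-ended interval (end <= current start) into a running maximum exactly once, keeping only still-open intervals in a pool; an empty interval (R <= L) is disjoint from every predecessor, so its chain extends the overall maximum.
import Mathlib
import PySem

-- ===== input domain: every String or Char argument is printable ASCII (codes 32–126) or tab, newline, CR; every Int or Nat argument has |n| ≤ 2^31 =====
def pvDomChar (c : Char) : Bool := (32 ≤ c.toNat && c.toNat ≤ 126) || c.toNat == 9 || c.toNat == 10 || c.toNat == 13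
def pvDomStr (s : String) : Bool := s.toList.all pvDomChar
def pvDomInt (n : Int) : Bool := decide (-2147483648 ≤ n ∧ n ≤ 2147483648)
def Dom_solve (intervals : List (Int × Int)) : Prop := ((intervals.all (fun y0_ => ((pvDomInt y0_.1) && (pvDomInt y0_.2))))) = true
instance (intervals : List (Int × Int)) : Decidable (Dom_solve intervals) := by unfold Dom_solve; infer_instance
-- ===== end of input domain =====

-- B replaces A's all-pairs DP with a one-pass sweep over the sorted intervals that folds each
-- finished interval into a running maximum once (objective: faster by a measured constant factor).
-- Note: Python A sorts `intervals` in place (observable mutation); the equivalence proved here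
-- is about the RETURN value only.


-- ===== PORT A =====
def solve (intervals : List (Int × Int)) : Int :=
  if intervals = [] then 0
  else
    let ivs := PySem.List.sorted2 intervals Prod.fst Prod.snd
    let dp0 : List Int := ivs.map (fun _ => 1)
    let dp := (PySem.List.enumerate ivs).foldl (fun dp ix =>
      (PySem.List.enumerate (PySem.List.slice ivs none (some ix.1))).foldl (fun dp jy =>
        if ¬ (max ix.2.1 jy.2.1 < min ix.2.2 jy.2.2) then
          PySem.List.pySetD dp ix.1 (max (PySem.List.pyGetD dp ix.1 0) (PySem.List.pyGetD dp jy.1 0 + 1))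
        else dp) dp) dp0
    (ivs.length : Int) - (PySem.List.max? dp (fun v => v)).getD 0

-- ===== PORT B =====
def solve_alt (intervals : List (Int × Int)) : Int :=
  if intervals = [] then 0
  else
    let n : Int := (intervals.length : Int)
    let ivs := PySem.List.sorted2 intervals Prod.fst Prod.snd
    -- state: (closed, longest, open_ends)
    let st := ivs.foldl (fun (st : Int × Int × List (Int × Int)) x =>
      let bs := st.2.2.foldl (fun (bs : Int × List (Int × Int)) rd =>
          if rd.1 ≤ x.1 then (max bs.1 rd.2, bs.2)
          else (bs.1, bs.2 ++ [rd])) (st.1, ([] : List (Int × Int)))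
      let d := if x.2 ≤ x.1 then st.2.1 + 1 else bs.1 + 1
      let g := max st.2.1 d
      (bs.1, g, bs.2 ++ [(x.2, d)])) (0, 0, [])
    n - st.2.1

-- ===== PRECONDITION & SPEC =====
def Spec_solve (intervals : List (Int × Int)) (out : Int) : Prop := out = solve_alt intervals
instance (intervals : List (Int × Int)) (out : Int) : Decidable (Spec_solve intervals out) := by unfold Spec_solve; infer_instance

-- ===== CLAIM (what is proved, stated in full; the proofs are below) =====
def Claim_equal_solve : Prop := ∀ (intervals : List (Int × Int)), Dom_solve intervals → Spec_solve intervals (solve intervals)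

-- ===== LEMMAS AND PROOFS =====

theorem getD_append_len (l1 l2 : List Int) (x d : Int) : (l1 ++ x :: l2).getD l1.length d = x := by
  simp [List.getD]

theorem set_append_len (l1 l2 : List Int) (x v : Int) : (l1 ++ x :: l2).set l1.length v = l1 ++ v :: l2 := by
  induction l1 with
  | nil => rfl
  | cons a l1 ih => simp [ih]

theorem enum_append {α : Type} (xs : List α) (y : α) (s : Int) :
    PySem.List.enumerate (xs ++ [y]) s = PySem.List.enumerate xs s ++ [(s + (xs.length : Int), y)] := by
  induction xs generalizing s with
  | nil => simp [PySem.List.enumerate_cons, PySem.List.enumerate_nil]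
  | cons a xs ih =>
      simp [PySem.List.enumerate_cons, ih]
      ring_nf

theorem innerA (x : Int × Int) (done : List ((Int × Int) × Int)) (mid suf : List Int) (a : Int) :
    (PySem.List.enumerate (done.map (·.1))).foldl (fun dp jy =>
        if ¬ (max x.1 jy.2.1 < min x.2 jy.2.2) then
          PySem.List.pySetD dp ((done.length + mid.length : Nat) : Int)
            (max (PySem.List.pyGetD dp ((done.length + mid.length : Nat) : Int) 0)
                 (PySem.List.pyGetD dp jy.1 0 + 1))
        else dp)
      (done.map (·.2) ++ (mid ++ a :: suf))
    = done.map (·.2) ++ (mid ++ (done.foldl (fun acc yd =>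
        if ¬ (max x.1 yd.1.1 < min x.2 yd.1.2) then max acc (yd.2 + 1) else acc) a) :: suf) := by
  induction done using List.reverseRecOn generalizing mid with
  | nil => simp [PySem.List.enumerate_nil]
  | append_singleton done' z ih =>
      simp only [List.map_append, List.map_singleton]
      rw [enum_append, List.foldl_append]
      have hidx : (((done' ++ [z]).length + mid.length : Nat) : Int) = ((done'.length + (z.2 :: mid).length : Nat) : Int) := by
        simp; push_cast; ring
      rw [hidx]
      have hinit : done'.map (·.2) ++ [z.2] ++ (mid ++ a :: suf)
          = done'.map (·.2) ++ ((z.2 :: mid) ++ a :: suf) := by simp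
      rw [hinit, ih (z.2 :: mid)]
      simp only [List.foldl_append, List.foldl_cons, List.foldl_nil]
      set b := done'.foldl (fun acc yd =>
        if ¬ (max x.1 yd.1.1 < min x.2 yd.1.2) then max acc (yd.2 + 1) else acc) a with hb
      by_cases hc : ¬ (max x.1 z.1.1 < min x.2 z.1.2)
      · rw [if_pos hc, if_pos hc]
        have h1 : PySem.List.pyGetD (done'.map (·.2) ++ ((z.2 :: mid) ++ b :: suf)) (0 + ((done'.map (·.1)).length : Int)) 0 = z.2 := by
          rw [zero_add, PySem.List.pyGetD_natCast]
          simpa using getD_append_len (done'.map (·.2)) (mid ++ b :: suf) z.2 0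
        have h2 : PySem.List.pyGetD (done'.map (·.2) ++ ((z.2 :: mid) ++ b :: suf)) ((done'.length + (z.2 :: mid).length : Nat) : Int) 0 = b := by
          rw [PySem.List.pyGetD_natCast]
          simpa using getD_append_len (done'.map (·.2) ++ z.2 :: mid) suf b 0
        have h3 : PySem.List.pySetD (done'.map (·.2) ++ ((z.2 :: mid) ++ b :: suf)) ((done'.length + (z.2 :: mid).length : Nat) : Int) (max b (z.2 + 1))
            = (done' ++ [z]).map (·.2) ++ (mid ++ (max b (z.2+1)) :: suf) := by
          rw [PySem.List.pySetD_natCast]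
          simpa using set_append_len (done'.map (·.2) ++ z.2 :: mid) suf b (max b (z.2+1))
        rw [h1, h2, h3]
        simp
      · rw [if_neg hc, if_neg hc]
        simp

def dpStep (done : List ((Int × Int) × Int)) (x : Int × Int) : List ((Int × Int) × Int) :=
  done ++ [(x, done.foldl (fun acc yd =>
    if ¬ (max x.1 yd.1.1 < min x.2 yd.1.2) then max acc (yd.2 + 1) else acc) 1)]

theorem foldl_dpStep_map_fst (s : List (Int × Int)) (done : List ((Int × Int) × Int)) :
    (s.foldl dpStep done).map (·.1) = done.map (·.1) ++ s := by
  induction s generalizing done with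
  | nil => simp
  | cons x s ih => simp [List.foldl_cons, ih, dpStep]

theorem outerA (s : List (Int × Int)) (k : Nat) (hk : k ≤ s.length) :
    (PySem.List.enumerate (s.take k)).foldl (fun dp ix =>
      (PySem.List.enumerate (PySem.List.slice s none (some ix.1))).foldl (fun dp jy =>
        if ¬ (max ix.2.1 jy.2.1 < min ix.2.2 jy.2.2) then
          PySem.List.pySetD dp ix.1 (max (PySem.List.pyGetD dp ix.1 0) (PySem.List.pyGetD dp jy.1 0 + 1))
        else dp) dp) (s.map (fun _ => 1))
    = ((s.take k).foldl dpStep []).map (·.2) ++ (s.drop k).map (fun _ => 1) := by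
  induction k with
  | zero => simp
  | succ k ih =>
      have hk' : k < s.length := by omega
      have htake : s.take (k+1) = s.take k ++ [s[k]] := by
        rw [List.take_succ]; simp [List.getElem?_eq_getElem hk']
      rw [htake, enum_append, List.foldl_append, ih (by omega)]
      simp only [List.foldl_cons, List.foldl_nil]
      have hlen : (s.take k).length = k := by simp [List.length_take]; omega
      have hslice : PySem.List.slice s none (some (0 + ((s.take k).length : Int))) = s.take k := by
        rw [zero_add, hlen, PySem.List.slice_to_natCast]
      rw [hslice]
      have hdrop : (s.drop k).map (fun _ => (1:Int)) = 1 :: (s.drop (k+1)).map (fun _ => (1:Int)) := by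
        rw [List.drop_eq_getElem_cons hk']; simp only [List.map_cons]
      rw [hdrop]
      have hdl : ((s.take k).foldl dpStep []).length = k := by
        have := congrArg List.length (foldl_dpStep_map_fst (s.take k) [])
        simpa [hlen] using this
      have henum : PySem.List.enumerate (s.take k) = PySem.List.enumerate ((((s.take k).foldl dpStep []).map (·.1))) := by
        rw [foldl_dpStep_map_fst]; simp
      rw [henum]
      have hin := innerA (s[k]) ((s.take k).foldl dpStep []) [] ((s.drop (k+1)).map (fun _ => 1)) 1
      simp only [List.nil_append, List.length_nil, Nat.add_zero] at hin
      have hidx : (0 + ((s.take k).length : Int)) = ((((s.take k).foldl dpStep []).length : Nat) : Int) := by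
        simp [hdl, hlen]
      rw [hidx, hin]
      have hstep : (s.take k ++ [s[k]]).foldl dpStep [] = dpStep ((s.take k).foldl dpStep []) s[k] := by
        rw [List.foldl_append]; rfl
      rw [hstep]
      simp [dpStep]

theorem foldl_step_ge (x : Int × Int) (l : List ((Int × Int) × Int)) (a : Int) :
    a ≤ l.foldl (fun acc yd =>
      if ¬ (max x.1 yd.1.1 < min x.2 yd.1.2) then max acc (yd.2 + 1) else acc) a := by
  induction l generalizing a with
  | nil => simp
  | cons yd l ih =>
      simp only [List.foldl_cons]
      split
      · exact le_trans (le_max_left _ _) (ih _)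
      · exact ih _

theorem dp_ge_one (s : List (Int × Int)) (done : List ((Int × Int) × Int))
    (h : ∀ yd ∈ done, 1 ≤ yd.2) : ∀ yd ∈ s.foldl dpStep done, 1 ≤ yd.2 := by
  induction s generalizing done with
  | nil => simpa using h
  | cons x s ih =>
      rw [List.foldl_cons]
      refine ih _ ?_
      intro yd hyd
      rcases List.mem_append.1 hyd with h1 | h2
      · exact h _ h1
      · simp only [List.mem_singleton] at h2
        subst h2
        exact foldl_step_ge x done 1

def gmaxOf (l : List ((Int × Int) × Int)) : Int := l.foldl (fun a yd => max a yd.2) 0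

theorem gmaxOf_eq (l : List ((Int × Int) × Int)) :
    gmaxOf l = (l.map (·.2)).foldl max 0 := by
  rw [gmaxOf, List.foldl_map]

theorem maxD_eq (d0 : Int) (t : List Int) (h : 0 ≤ d0) :
    (PySem.List.max? (d0 :: t) (fun v => v)).getD 0 = (d0 :: t).foldl max 0 := by
  rw [PySem.List.max?_id_cons]
  simp only [Option.getD_some, List.foldl_cons]
  rw [max_eq_right h]

def dmax (l : List (Int × Int)) : Int := l.foldl (fun a rd => max a rd.2) 0
def pairsOf (l : List ((Int × Int) × Int)) : List (Int × Int) := l.map (fun yd => (yd.1.2, yd.2))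

theorem dmax_perm {l1 l2 : List (Int × Int)} (h : l1.Perm l2) : dmax l1 = dmax l2 := by
  unfold dmax
  exact @List.Perm.foldl_eq _ _ _ _ _ ⟨fun b a1 a2 => by simp; omega⟩ h 0

theorem filterB (pending : List (Int × Int)) (L b : Int) (acc : List (Int × Int)) :
    pending.foldl (fun (bs : Int × List (Int × Int)) rd =>
        if rd.1 ≤ L then (max bs.1 rd.2, bs.2)
        else (bs.1, bs.2 ++ [rd])) (b, acc)
    = ((pending.filter (fun rd => decide (rd.1 ≤ L))).foldl (fun a rd => max a rd.2) b,
       acc ++ pending.filter (fun rd => !decide (rd.1 ≤ L))) := by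
  induction pending generalizing b acc with
  | nil => simp
  | cons rd pending ih =>
      by_cases h : rd.1 ≤ L <;> simp [h, ih]

theorem foldl_max_succ (l : List ((Int × Int) × Int)) (c : Int) :
    l.foldl (fun a yd => max a (yd.2 + 1)) (c + 1) = l.foldl (fun a yd => max a yd.2) c + 1 := by
  induction l generalizing c with
  | nil => simp
  | cons yd l ih =>
      simp only [List.foldl_cons]
      rw [show max (c+1) (yd.2+1) = (max c yd.2) + 1 from by omega]
      exact ih _

theorem mainB (r : List (Int × Int)) (done : List ((Int × Int) × Int))
    (retired pending : List (Int × Int)) (best g : Int)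
    (hperm : (pairsOf done).Perm (retired ++ pending))
    (hbest : best = dmax retired)
    (hg : g = gmaxOf done)
    (hret : ∀ rd ∈ retired, ∀ x ∈ r, rd.1 ≤ x.1)
    (hsort : ((done.map (·.1)) ++ r).Pairwise (fun a b => a.1 ≤ b.1)) :
    (r.foldl (fun (st : Int × Int × List (Int × Int)) x =>
      let bs := st.2.2.foldl (fun (bs : Int × List (Int × Int)) rd =>
          if rd.1 ≤ x.1 then (max bs.1 rd.2, bs.2)
          else (bs.1, bs.2 ++ [rd])) (st.1, ([] : List (Int × Int)))
      let d := if x.2 ≤ x.1 then st.2.1 + 1 else bs.1 + 1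
      let g := max st.2.1 d
      (bs.1, g, bs.2 ++ [(x.2, d)])) (best, g, pending)).2.1
    = gmaxOf (r.foldl dpStep done) := by
  induction r generalizing done retired pending best g with
  | nil => simpa using hg
  | cons x r ih =>
      rw [List.foldl_cons, List.foldl_cons]
      simp only [filterB pending x.1 best []]
      set filT := pending.filter (fun rd => decide (rd.1 ≤ x.1)) with hfilT
      set filF := pending.filter (fun rd => !decide (rd.1 ≤ x.1)) with hfilF
      set bestT := filT.foldl (fun a rd => max a rd.2) best with hbestT
      -- facts from sortedness
      have hsplit := List.pairwise_append.1 hsort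
      have hfst : ∀ yd ∈ done, yd.1.1 ≤ x.1 := by
        intro yd hyd
        exact hsplit.2.2 _ (List.mem_map_of_mem hyd) x (List.mem_cons_self)
      have hxr : ∀ x' ∈ r, x.1 ≤ x'.1 := by
        intro x' hx'
        exact (List.pairwise_cons.1 hsplit.2.1).1 x' hx'
      -- the dp value of x
      set dA := done.foldl (fun acc yd =>
        if ¬ (max x.1 yd.1.1 < min x.2 yd.1.2) then max acc (yd.2 + 1) else acc) 1 with hdA
      have hd : (if x.2 ≤ x.1 then g + 1 else bestT + 1) = dA := by
        by_cases hx : x.2 ≤ x.1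
        · rw [if_pos hx, hdA]
          have : done.foldl (fun acc yd =>
              if ¬ (max x.1 yd.1.1 < min x.2 yd.1.2) then max acc (yd.2 + 1) else acc) 1
              = done.foldl (fun acc yd => max acc (yd.2 + 1)) 1 := by
            apply PySem.List.foldl_congr_mem
            intro acc yd hyd
            rw [if_pos]
            have := hfst yd hyd
            simp; omega
          have hms := foldl_max_succ done 0
          simp only [zero_add] at hms
          rw [this, hms, hg, gmaxOf]
        · rw [if_neg hx, hdA]
          have hcong : done.foldl (fun acc yd =>
              if ¬ (max x.1 yd.1.1 < min x.2 yd.1.2) then max acc (yd.2 + 1) else acc) 1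
              = done.foldl (fun acc yd =>
              if yd.1.2 ≤ x.1 then max acc (yd.2 + 1) else acc) 1 := by
            apply PySem.List.foldl_congr_mem
            intro acc yd hyd
            have := hfst yd hyd
            by_cases hy : yd.1.2 ≤ x.1
            · rw [if_pos hy, if_pos]; simp; omega
            · rw [if_neg hy, if_neg]; simp; omega
          have hms := foldl_max_succ (done.filter (fun yd => decide (yd.1.2 ≤ x.1))) 0
          simp only [zero_add] at hms
          rw [hcong, PySem.List.foldl_ite_eq_foldl_filter, hms]
          congr 1
          have hmapfil : (done.filter (fun yd => decide (yd.1.2 ≤ x.1))).foldl (fun a yd => max a yd.2) 0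
              = dmax ((pairsOf done).filter (fun rd => decide (rd.1 ≤ x.1))) := by
            rw [dmax, pairsOf, List.filter_map]
            rw [List.foldl_map]
            rfl
          have hpf : ((pairsOf done).filter (fun rd => decide (rd.1 ≤ x.1))).Perm (retired ++ filT) := by
            have := hperm.filter (fun rd => decide (rd.1 ≤ x.1))
            rw [List.filter_append] at this
            have hre : retired.filter (fun rd => decide (rd.1 ≤ x.1)) = retired := by
              apply List.filter_eq_self.2
              intro rd hrd
              simpa using hret rd hrd x (List.mem_cons_self)
            rwa [hre] at this
          rw [hmapfil, dmax_perm hpf, hbestT, hbest]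
          simp [dmax, List.foldl_append]
      rw [hd]
      have hgm : max g dA = gmaxOf (dpStep done x) := by
        rw [dpStep, gmaxOf, List.foldl_append, ← hdA]
        simp only [List.foldl_cons, List.foldl_nil]
        rw [hg, gmaxOf]
      rw [hgm]
      refine ih (dpStep done x) (retired ++ filT) (filF ++ [(x.2, dA)]) bestT (gmaxOf (dpStep done x)) ?_ ?_ rfl ?_ ?_
      · -- perm
        rw [dpStep, pairsOf, List.map_append, ← pairsOf]
        simp only [List.map_singleton]
        have p1 : (pairsOf done ++ [(x.2, dA)]).Perm ((retired ++ pending) ++ [(x.2, dA)]) :=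
          hperm.append_right _
        have p2 : ((retired ++ pending) ++ [(x.2, dA)]).Perm ((retired ++ (filT ++ filF)) ++ [(x.2, dA)]) := by
          refine List.Perm.append_right _ (List.Perm.append_left _ ?_)
          exact (List.filter_append_perm _ _).symm
        have p3 : (retired ++ (filT ++ filF)) ++ [(x.2, dA)] = (retired ++ filT) ++ (filF ++ [(x.2, dA)]) := by simp
        exact (p1.trans p2).trans (p3 ▸ List.Perm.refl _)
      · rw [hbestT, hbest]
        simp [dmax, List.foldl_append]
      · intro rd hrd x' hx'
        rcases List.mem_append.1 hrd with h1 | h2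
        · exact hret rd h1 x' (List.mem_cons_of_mem _ hx')
        · have hle := List.of_mem_filter h2
          simp at hle
          have := hxr x' hx'
          omega
      · rw [dpStep, List.map_append]
        simp only [List.map_singleton]
        have : (done.map (·.1) ++ [x]) ++ r = done.map (·.1) ++ (x :: r) := by simp
        rw [this]
        exact hsort

theorem insertBy_pairwise_lex (x : Int × Int) (l : List (Int × Int))
    (lb : (Int × Int) → (Int × Int) → Bool)
    (hlb : lb = fun a b => decide (a.1 < b.1) || (!decide (b.1 < a.1) && decide (a.2 < b.2)))
    (h : l.Pairwise (fun a b => lb b a = false)) :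
    (PySem.List.insertBy lb x l).Pairwise (fun a b => lb b a = false) := by
  induction l with
  | nil => simp [PySem.List.insertBy]
  | cons y ys ih =>
      rw [PySem.List.insertBy]
      rcases List.pairwise_cons.1 h with ⟨hy, hys⟩
      by_cases hc : lb x y = true
      · rw [if_pos hc]
        refine List.pairwise_cons.2 ⟨?_, h⟩
        intro a ha
        rcases List.mem_cons.1 ha with rfl | ha
        · subst hlb; simp at hc ⊢; omega
        · have := hy a ha
          subst hlb; simp at hc this ⊢; omega
      · rw [if_neg hc]
        refine List.pairwise_cons.2 ⟨?_, ih hys⟩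
        intro a ha
        rcases (PySem.List.mem_insertBy _ _ _ _).1 ha with rfl | ha
        · simpa using hc
        · exact hy a ha

theorem sorted2_fst_pairwise (xs : List (Int × Int)) :
    (PySem.List.sorted2 xs Prod.fst Prod.snd).Pairwise (fun a b => a.1 ≤ b.1) := by
  have key : ∀ (l acc : List (Int × Int)),
      acc.Pairwise (fun a b =>
        (fun a b : Int × Int => decide (a.1 < b.1) || (!decide (b.1 < a.1) && decide (a.2 < b.2))) b a = false) →
      (l.foldl (fun acc x => PySem.List.insertBy
          (fun a b : Int × Int => decide (a.1 < b.1) || (!decide (b.1 < a.1) && decide (a.2 < b.2))) x acc) acc).Pairwise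
        (fun a b =>
        (fun a b : Int × Int => decide (a.1 < b.1) || (!decide (b.1 < a.1) && decide (a.2 < b.2))) b a = false) := by
    intro l
    induction l with
    | nil => intro acc h; simpa using h
    | cons x l ih =>
        intro acc h
        rw [List.foldl_cons]
        exact ih _ (insertBy_pairwise_lex x acc _ rfl h)
  have h2 := key xs [] (by simp)
  have h3 : PySem.List.sorted2 xs Prod.fst Prod.snd
      = xs.foldl (fun acc x => PySem.List.insertBy
          (fun a b : Int × Int => decide (a.1 < b.1) || (!decide (b.1 < a.1) && decide (a.2 < b.2))) x acc) [] := by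
    rfl
  rw [h3]
  refine List.Pairwise.imp ?_ h2
  intro a b hab
  simp at hab
  omega

theorem solveA (intervals : List (Int × Int)) (h : ¬ intervals = []) :
    solve intervals =
      ((PySem.List.sorted2 intervals Prod.fst Prod.snd).length : Int) -
        gmaxOf ((PySem.List.sorted2 intervals Prod.fst Prod.snd).foldl dpStep []) := by
  have hperm := PySem.List.sorted2_perm intervals Prod.fst Prod.snd false
  have hs : PySem.List.sorted2 intervals Prod.fst Prod.snd ≠ [] := by
    intro he
    rw [he] at hperm
    exact h (List.Perm.eq_nil hperm.symm)
  unfold solve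
  rw [if_neg h]
  set s := PySem.List.sorted2 intervals Prod.fst Prod.snd with hsdef
  simp only []
  conv_lhs => rw [show PySem.List.enumerate s = PySem.List.enumerate (s.take s.length) from by rw [List.take_length]]
  rw [outerA s s.length (le_refl _)]
  simp only [List.take_length, List.drop_length, List.map_nil, List.append_nil]
  obtain ⟨y0, t, hdl⟩ : ∃ y0 t, s.foldl dpStep [] = y0 :: t := by
    cases hdp : s.foldl dpStep [] with
    | nil =>
        exfalso
        apply hs
        have := foldl_dpStep_map_fst s []
        rw [hdp] at this
        simpa using this.symm
    | cons y0 t => exact ⟨y0, t, rfl⟩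
  have hge : 1 ≤ y0.2 := by
    have := dp_ge_one s [] (by simp) y0 (by rw [hdl]; exact List.mem_cons_self)
    exact this
  rw [hdl]
  simp only [List.map_cons]
  rw [maxD_eq _ _ (by omega)]
  rw [gmaxOf_eq]
  simp only [List.map_cons]

theorem solveB (intervals : List (Int × Int)) (h : ¬ intervals = []) :
    solve_alt intervals =
      ((PySem.List.sorted2 intervals Prod.fst Prod.snd).length : Int) -
        gmaxOf ((PySem.List.sorted2 intervals Prod.fst Prod.snd).foldl dpStep []) := by
  have hperm := PySem.List.sorted2_perm intervals Prod.fst Prod.snd false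
  unfold solve_alt
  rw [if_neg h]
  simp only []
  rw [hperm.length_eq]
  congr 1
  refine mainB (PySem.List.sorted2 intervals Prod.fst Prod.snd) [] [] [] 0 0 ?_ rfl rfl ?_ ?_
  · simp [pairsOf]
  · intro rd hrd; simp at hrd
  · simpa using sorted2_fst_pairwise intervals

-- ===== VERDICT (by name: the statement is the Claim_ definition above) =====
theorem solve_spec : Claim_equal_solve := by
  intro intervals _
  unfold Spec_solve
  by_cases h : intervals = []
  · subst h; rfl
  · rw [solveA intervals h, solveB intervals h]
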